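-- pv_equiv track=rewrite | github.com/amanabiy/competitive_programming | 1332-remove-palindromic-subsequences/1332-remove-palindromic-subsequences.py | removePalindromeSub
-- ===== SOURCE A (Python) =====
-- def removePalindromeSub(s: str) -> int:
--     left = 0
--     right = len(s) - 1
--
--     while left < right:
--         if s[left] != s[right]:
--             return 2
--         left += 1
--         right -= 1
--
--
--     return 1
-- ===== SOURCE B (Python) =====
-- def removePalindromeSub(s: str) -> int:
--     return 1 if s == s[::-1] else 2
-- ===== Notes on version B (the rewrite author's own statement) =====
-- stated objective: simpler
-- what changed: Replaces the explicit two-pointer inward while-loop (with early return on mismatch) by building the reversed string once with s[::-1] and doing a single bulk equality test.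
import Mathlib
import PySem

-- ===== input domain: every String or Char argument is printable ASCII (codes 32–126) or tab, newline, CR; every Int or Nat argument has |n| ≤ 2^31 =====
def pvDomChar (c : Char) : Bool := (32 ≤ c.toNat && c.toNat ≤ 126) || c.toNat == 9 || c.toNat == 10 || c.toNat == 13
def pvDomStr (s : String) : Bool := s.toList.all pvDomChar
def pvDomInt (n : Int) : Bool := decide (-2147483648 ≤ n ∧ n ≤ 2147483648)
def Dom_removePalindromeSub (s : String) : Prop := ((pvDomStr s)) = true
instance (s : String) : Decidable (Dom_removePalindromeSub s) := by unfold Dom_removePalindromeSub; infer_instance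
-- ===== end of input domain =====

-- B replaces A's two-pointer inward scan with a build-the-reverse-then-compare-once formulation (objective: simpler).

-- ===== PORT A =====
-- the while-loop of A: state (left, right), steps inward, early 2 on mismatch
def removePalindromeSubLoop (s : String) (left right : Int) : Int :=
  if _h : left < right then
    if PySem.Str.pyGet? s left ≠ PySem.Str.pyGet? s right then 2
    else removePalindromeSubLoop s (left + 1) (right - 1)
  else 1
termination_by (right - left).toNat
decreasing_by omega

def removePalindromeSub (s : String) : Int :=
  removePalindromeSubLoop s 0 (PySem.Str.len s - 1)

-- ===== PORT B =====
def removePalindromeSub_alt (s : String) : Int :=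
  match PySem.Str.slice? s none none (-1) with
  | some t => if s = t then 1 else 2
  | none => 2   -- unreachable: step = -1 ≠ 0

-- ===== PRECONDITION & SPEC =====
def Spec_removePalindromeSub (s : String) (out : Int) : Prop := out = removePalindromeSub_alt s
instance (s : String) (out : Int) : Decidable (Spec_removePalindromeSub s out) := by unfold Spec_removePalindromeSub; infer_instance

-- ===== CLAIM (what is proved, stated in full; the proofs are below) =====
def Claim_equal_removePalindromeSub : Prop := ∀ (s : String), Dom_removePalindromeSub s → Spec_removePalindromeSub s (removePalindromeSub s)

-- ===== LEMMAS AND PROOFS =====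

-- the while-loop, from a symmetric state (l, n-1-l), decides the pairwise palindrome condition from l on
lemma loop_eq (s : String) (l : Nat) :
    removePalindromeSubLoop s (l : Int) ((s.toList.length : Int) - 1 - (l : Int)) =
      if ∀ i : Nat, i < s.toList.length → l ≤ i → 2 * i + 1 < s.toList.length →
          s.toList[i]? = s.toList[s.toList.length - 1 - i]? then 1 else 2 := by
  set cs := s.toList with hcs
  generalize hn : cs.length = n
  induction hfuel : n - l using Nat.strong_induction_on generalizing l with
  | _ fuel ih =>
  subst hfuel
  rw [removePalindromeSubLoop]
  by_cases hlt : (l : Int) < (n : Int) - 1 - l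
  · have hl2 : 2 * l + 1 < n := by omega
    have hget_l : PySem.Str.pyGet? s (l : Int) = cs[l]? := by
      simp [hcs]
    have hidx : ((n : Int) - 1 - l) = ((n - 1 - l : Nat) : Int) := by omega
    have hget_r : PySem.Str.pyGet? s ((n : Int) - 1 - l) = cs[n - 1 - l]? := by
      rw [hidx]; simp [hcs]
    rw [dif_pos hlt]
    by_cases heq : cs[l]? = cs[n - 1 - l]?
    · have hrec : (l : Int) + 1 = ((l + 1 : Nat) : Int) := by omega
      have hrec2 : (n : Int) - 1 - l - 1 = (n : Int) - 1 - ((l + 1 : Nat) : Int) := by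
        push_cast; ring
      rw [if_neg (by rw [hget_l, hget_r]; exact not_not_intro heq), hrec, hrec2]
      rw [ih (n - (l + 1)) (by omega) (l + 1) rfl]
      congr 1
      simp only [eq_iff_iff]
      constructor
      · intro h i hin hli h2i
        rcases Nat.eq_or_lt_of_le hli with rfl | hlt'
        · exact heq
        · exact h i hin hlt' h2i
      · intro h i hin hli h2i
        exact h i hin (by omega) h2i
    · rw [if_pos (by rw [hget_l, hget_r]; exact heq)]
      rw [if_neg]
      intro hall
      exact heq (hall l (by omega) le_rfl hl2)
  · rw [dif_neg hlt, if_pos]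
    intro i _ hli h2i
    omega

-- pairwise half-range condition ↔ the list equals its reverse
lemma pal_iff (cs : List Char) :
    (∀ i : Nat, i < cs.length → 0 ≤ i → 2 * i + 1 < cs.length →
        cs[i]? = cs[cs.length - 1 - i]?) ↔ cs = cs.reverse := by
  constructor
  · intro h
    apply List.ext_getElem?
    intro i
    by_cases hi : i < cs.length
    · rw [List.getElem?_reverse hi]
      rcases Nat.lt_trichotomy (2 * i + 1) cs.length with hlt | heq | hgt
      · exact h i hi (Nat.zero_le _) hlt
      · have : cs.length - 1 - i = i := by omega
        rw [this]
      · have hj : 2 * (cs.length - 1 - i) + 1 < cs.length := by omega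
        have := h (cs.length - 1 - i) (by omega) (Nat.zero_le _) hj
        have hji : cs.length - 1 - (cs.length - 1 - i) = i := by omega
        rw [hji] at this
        exact this.symm
    · rw [List.getElem?_eq_none (by omega), List.getElem?_eq_none (by simp; omega)]
  · intro h i hi _ h2i
    have h1 : cs[cs.length - 1 - i]? = cs.reverse[cs.length - 1 - i]? := by rw [← h]
    rw [h1, List.getElem?_reverse (by omega),
      show cs.length - 1 - (cs.length - 1 - i) = i from by omega]

-- ===== VERDICT (by name: the statement is the Claim_ definition above) =====
theorem removePalindromeSub_spec : Claim_equal_removePalindromeSub := by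
  intro s _
  unfold Spec_removePalindromeSub removePalindromeSub removePalindromeSub_alt
  rw [PySem.Str.slice?_none_none_neg_one]
  have hl := loop_eq s 0
  simp only [Nat.cast_zero, sub_zero] at hl
  rw [show PySem.Str.len s = (s.toList.length : Int) from by simp [PySem.Str.len_eq], hl]
  have hs : s = String.ofList s.toList.reverse ↔ s.toList = s.toList.reverse := by
    constructor
    · intro h
      conv_lhs => rw [h]
      simp
    · intro h
      apply String.toList_injective
      rw [← h]
      simp
  rw [if_congr ((pal_iff s.toList).trans hs.symm) rfl rfl]
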